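-- pv_equiv track=rewrite | github.com/miloszchodan/Linear-Algebra-in-Python | LinearAlgebra/Algebra.py | MinimizeHammingDistance
-- ===== SOURCE A (Python) =====
-- def MinimizeHammingDistance(v, c):
--     #v to wektor odkodowywany a c to to C co jest w zadaniach
--     d = []
--     for j in range(len(c)):
--         odl = 0
--         for i in range(len(v)):
--             if (c[j][i] != v[i]):
--                 odl += 1
--         d.append(odl)
--     a = min(d)
--     L = []
--     for j in range(len(d)):
--         if d[j] == a:
--             L.append(c[j])
--     w = L[0]
--     w = [w[0], w[1], w[2], w[3]]
--     return w
-- ===== SOURCE B (Python) =====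
-- def MinimizeHammingDistance(v, c):
--     # One pass: keep the best (distance, codeword) seen so far; strict '<' keeps the first minimum.
--     best = None
--     best_d = None
--     for cw in c:
--         d = sum(x != y for x, y in zip(cw, v))
--         if best_d is None or d < best_d:
--             best_d = d
--             best = cw
--     return [best[0], best[1], best[2], best[3]]
-- ===== Notes on version B (the rewrite author's own statement) =====
-- stated objective: simpler
-- what changed: Replaces A's three loops (build a distance list, take its min, rescan for the first match) with a single pass keeping the best (distance, codeword) pair, distances via zip instead of indexing.
import Mathlib
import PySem

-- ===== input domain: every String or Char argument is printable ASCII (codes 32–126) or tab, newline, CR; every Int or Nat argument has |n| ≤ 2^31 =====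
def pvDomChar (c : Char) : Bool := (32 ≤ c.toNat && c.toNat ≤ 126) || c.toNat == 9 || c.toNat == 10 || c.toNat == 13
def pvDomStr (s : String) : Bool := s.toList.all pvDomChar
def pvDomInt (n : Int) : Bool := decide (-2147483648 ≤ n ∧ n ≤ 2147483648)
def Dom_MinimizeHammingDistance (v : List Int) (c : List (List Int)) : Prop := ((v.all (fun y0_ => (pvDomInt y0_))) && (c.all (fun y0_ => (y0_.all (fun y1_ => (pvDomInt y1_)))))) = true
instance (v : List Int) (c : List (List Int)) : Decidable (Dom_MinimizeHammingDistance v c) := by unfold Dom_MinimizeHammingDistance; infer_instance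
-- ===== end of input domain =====

-- B changes structure only: one pass keeping the best (distance, codeword) pair instead of
-- A's build-distance-list / min / rescan-for-first-match three loops; same cost, simpler.

-- ===== PORT A =====
-- Literal port of A; under Pre_ every index read by A is in range, so getD is exact there.
def MinimizeHammingDistance (v : List Int) (c : List (List Int)) : List Int :=
  let d := (List.range c.length).map (fun j =>
    (List.range v.length).foldl (fun odl i =>
      if (c.getD j []).getD i 0 ≠ v.getD i 0 then odl + 1 else odl) (0 : Int))
  let a := (PySem.List.min? d (fun x => x)).getD 0
  let L := (List.range d.length).foldl (fun L j =>
    if d.getD j 0 = a then L ++ [c.getD j []] else L) ([] : List (List Int))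
  let w := L.headD []
  [w.getD 0 0, w.getD 1 0, w.getD 2 0, w.getD 3 0]

-- ===== PORT B =====
def bDist (v cw : List Int) : Int :=
  (cw.zip v).foldl (fun d p => if p.1 ≠ p.2 then d + 1 else d) 0

def MinimizeHammingDistance_alt (v : List Int) (c : List (List Int)) : List Int :=
  let best := c.foldl (fun st cw =>
    let d := bDist v cw
    match st with
    | none => some (d, cw)
    | some (bd, b) => if d < bd then some (d, cw) else some (bd, b))
    (none : Option (Int × List Int))
  let w := (best.map Prod.snd).getD []
  [w.getD 0 0, w.getD 1 0, w.getD 2 0, w.getD 3 0]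

-- ===== PRECONDITION & SPEC =====
-- spec-level Hamming distance, used only by Pre_ (neither port's code)
def pvHam (v cw : List Int) : Nat := (cw.zip v).countP (fun p => decide (p.1 ≠ p.2))

-- Pre_ admits exactly the inputs on which A returns: c nonempty (else min([]) ValueError),
-- every codeword at least as long as v (else IndexError in the distance loop), and the FIRST
-- minimal-distance codeword of length ≥ 4 (else IndexError in the final indexing; B raises
-- there too). No input on which A returns a value is excluded.
def Pre_MinimizeHammingDistance (v : List Int) (c : List (List Int)) : Prop :=
  c ≠ [] ∧ (∀ cw ∈ c, v.length ≤ cw.length) ∧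
  ∀ j < c.length,
    ((∀ k < c.length, pvHam v (c.getD j []) ≤ pvHam v (c.getD k [])) ∧
     (∀ i < j, pvHam v (c.getD i []) ≠ pvHam v (c.getD j []))) →
    4 ≤ (c.getD j []).length
instance (v : List Int) (c : List (List Int)) : Decidable (Pre_MinimizeHammingDistance v c) := by
  unfold Pre_MinimizeHammingDistance; infer_instance

def pvWitness_MinimizeHammingDistance : List Int × List (List Int) :=
  ([1, 0, 1, 0], [[0, 0, 0, 0], [1, 1, 1, 1], [1, 0, 1, 1]])

def Spec_MinimizeHammingDistance (v : List Int) (c : List (List Int)) (out : List Int) : Prop := out = MinimizeHammingDistance_alt v c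
instance (v : List Int) (c : List (List Int)) (out : List Int) : Decidable (Spec_MinimizeHammingDistance v c out) := by unfold Spec_MinimizeHammingDistance; infer_instance

-- ===== CLAIM (what is proved, stated in full; the proofs are below) =====
def Claim_equal_MinimizeHammingDistance : Prop := ∀ (v : List Int) (c : List (List Int)), Dom_MinimizeHammingDistance v c → Pre_MinimizeHammingDistance v c → Spec_MinimizeHammingDistance v c (MinimizeHammingDistance v c)

-- ===== LEMMAS AND PROOFS =====

-- indexed map over range = map
theorem mapRange_getD {α β : Type} (l : List α) (dflt : α) (g : α → β) :
    (List.range l.length).map (fun j => g (l.getD j dflt)) = l.map g := by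
  induction l with
  | nil => rfl
  | cons x xs ih =>
    simp only [List.length_cons, List.range_succ_eq_map, List.map_cons, List.map_map]
    simp only [List.getD_cons_zero]
    exact congrArg _ (ih)

-- A's inner counting loop equals B's zip-fold when v is no longer than cw
theorem dist_eq (v : List Int) : ∀ (cw : List Int) (z : Int), v.length ≤ cw.length →
    (List.range v.length).foldl (fun odl i =>
      if cw.getD i 0 ≠ v.getD i 0 then odl + 1 else odl) z
    = (cw.zip v).foldl (fun d p => if p.1 ≠ p.2 then d + 1 else d) z := by
  induction v with
  | nil => intro cw z _; simp
  | cons y ys ih =>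
    intro cw z h
    cases cw with
    | nil => simp at h
    | cons x xs =>
      simp only [List.length_cons, List.range_succ_eq_map, List.foldl_cons, List.foldl_map,
        List.getD_cons_zero, List.getD_cons_succ, List.zip_cons_cons]
      exact ih xs _ (by simpa using h)

-- append-if fold over indices = filtered map
theorem foldl_append_if_idx {α β : Type} (P : α → Prop) [DecidablePred P] (g : α → β) :
    ∀ (idx : List α) (acc : List β),
    idx.foldl (fun L j => if P j then L ++ [g j] else L) acc
      = acc ++ (idx.filter (fun j => decide (P j))).map g := by
  intro idx
  induction idx with
  | nil => intro acc; simp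
  | cons j js ih =>
    intro acc
    simp only [List.foldl_cons, List.filter_cons]
    by_cases h : P j
    · simp [h, ih]
    · simp [h, ih]

-- filter over range of indices = filter over the list
theorem filterMap_range {α : Type} (p : α → Bool) :
    ∀ (l : List α) (dflt : α),
    ((List.range l.length).filter (fun j => p (l.getD j dflt))).map (fun j => l.getD j dflt)
      = l.filter p := by
  intro l
  induction l with
  | nil => intro dflt; rfl
  | cons x xs ih =>
    intro dflt
    simp only [List.length_cons, List.range_succ_eq_map, List.filter_cons, List.getD_cons_zero,
      List.filter_map, Function.comp_def, List.getD_cons_succ]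
    have ih' := ih dflt
    simp only [List.getD] at ih'
    by_cases h : p x
    · simp [h, Function.comp_def, List.getD, ih']
    · simp [h, Function.comp_def, List.getD, ih']

theorem foldl_min_le (l : List Int) : ∀ (b : Int), l.foldl min b ≤ b := by
  induction l with
  | nil => intro b; simp
  | cons x xs ih =>
    intro b
    simp only [List.foldl_cons]
    exact le_trans (ih _) (min_le_left _ _)

theorem foldl_min_mem (l : List Int) : ∀ (b : Int), l.foldl min b = b ∨ l.foldl min b ∈ l := by
  induction l with
  | nil => intro b; left; rfl
  | cons x xs ih =>
    intro b
    simp only [List.foldl_cons]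
    rcases ih (min b x) with h | h
    · rcases le_total b x with hbx | hxb
      · left; rw [h, min_eq_left hbx]
      · right; rw [h, min_eq_right hxb]; exact List.mem_cons_self
    · right; exact List.mem_cons_of_mem _ h

theorem headD_congr {α : Type} (l : List α) (h : l ≠ []) (a b : α) : l.headD a = l.headD b := by
  cases l with
  | nil => exact absurd rfl h
  | cons x xs => rfl

-- characterisation of the pair-fold underlying B
theorem pairfold {α : Type} [Inhabited α] (f : α → Int) :
    ∀ (c : List α) (bd : Int) (b : α),
    c.foldl (fun p x => if f x < p.1 then (f x, x) else p) (bd, b)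
      = ((c.map f).foldl min bd,
         if (c.map f).foldl min bd < bd then
           (c.filter (fun x => decide (f x = (c.map f).foldl min bd))).headD b
         else b) := by
  intro c
  induction c with
  | nil => intro bd b; simp
  | cons x xs ih =>
    intro bd b
    simp only [List.foldl_cons, List.map_cons, List.filter_cons]
    by_cases h : f x < bd
    · have hmin : min bd (f x) = f x := min_eq_right h.le
      simp only [if_pos h, hmin, ih (f x) x]
      have hM : (xs.map f).foldl min (f x) ≤ f x := foldl_min_le _ _
      have hMbd : (xs.map f).foldl min (f x) < bd := lt_of_le_of_lt hM h
      simp only [if_pos hMbd]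
      by_cases hx : f x = (xs.map f).foldl min (f x)
      · simp [← hx]
      · have hlt : (xs.map f).foldl min (f x) < f x := lt_of_le_of_ne hM (fun e => hx e.symm)
        simp only [if_pos hlt, hx, decide_false, Bool.false_eq_true, if_false]
        rcases foldl_min_mem (xs.map f) (f x) with he | he
        · exact absurd he.symm hx
        · obtain ⟨y, hy, hfy⟩ := List.mem_map.mp he
          have hne : xs.filter (fun z => decide (f z = (xs.map f).foldl min (f x))) ≠ [] := by
            apply List.ne_nil_of_mem (a := y)
            exact List.mem_filter.mpr ⟨hy, by simp [hfy]⟩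
          exact Prod.ext rfl (headD_congr _ hne _ _)
    · have hmin : min bd (f x) = bd := min_eq_left (le_of_not_gt h)
      simp only [if_neg h, hmin, ih bd b]
      by_cases hM : (xs.map f).foldl min bd < bd
      · have hfx : ¬ (f x = (xs.map f).foldl min bd) := by
          have : bd ≤ f x := le_of_not_gt h
          omega
        simp [if_pos hM, hfx]
      · simp [if_neg hM]

-- B's option-fold strips to the pair-fold
theorem optfold (v : List Int) :
    ∀ (c : List (List Int)) (bd : Int) (b : List Int),
    c.foldl (fun st cw =>
      let d := bDist v cw
      match st with
      | none => some (d, cw)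
      | some (bd, b) => if d < bd then some (d, cw) else some (bd, b))
      (some (bd, b))
    = some (c.foldl (fun p cw => if bDist v cw < p.1 then (bDist v cw, cw) else p) (bd, b)) := by
  intro c
  induction c with
  | nil => intro bd b; rfl
  | cons x xs ih =>
    intro bd b
    simp only [List.foldl_cons]
    by_cases h : bDist v x < bd <;> simp [h, ih]

theorem getD_map_lt {α β : Type} (f : α → β) (l : List α) (j : ℕ) (h : j < l.length)
    (d0 : β) (d1 : α) : (l.map f).getD j d0 = f (l.getD j d1) := by
  simp [List.getD, h]

-- A's index-filter loop over the distance list selects exactly the minimal codewords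
theorem a_select (f : List Int → Int) (x : List Int) (xs : List (List Int)) (M : Int) :
    (List.range (f x :: xs.map f).length).foldl (fun L j =>
      if (f x :: xs.map f).getD j 0 = M then L ++ [(x :: xs).getD j []] else L)
      ([] : List (List Int))
    = (x :: xs).filter (fun cw => decide (f cw = M)) := by
  rw [foldl_append_if_idx]
  simp only [List.nil_append]
  have hl : (f x :: xs.map f).length = (x :: xs).length := by simp
  rw [hl]
  have hcg : ∀ j ∈ List.range (x :: xs).length,
      (decide ((f x :: xs.map f).getD j 0 = M)) = (decide (f ((x :: xs).getD j []) = M)) := by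
    intro j hj
    rw [List.mem_range] at hj
    rw [show (f x :: xs.map f) = (x :: xs).map f from rfl, getD_map_lt f (x :: xs) j hj 0 []]
  rw [List.filter_congr hcg]
  exact filterMap_range (fun cw => decide (f cw = M)) (x :: xs) []

-- the first minimal codeword, two ways
theorem headD_filter_eq (f : List Int → Int) (x : List Int) (xs : List (List Int)) :
    ((x :: xs).filter (fun cw => decide (f cw = (xs.map f).foldl min (f x)))).headD []
    = (if (xs.map f).foldl min (f x) < f x then
        (xs.filter (fun cw => decide (f cw = (xs.map f).foldl min (f x)))).headD x else x) := by
  by_cases hx : f x = (xs.map f).foldl min (f x)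
  · simp [← hx]
  · have hM := foldl_min_le (xs.map f) (f x)
    have hlt : (xs.map f).foldl min (f x) < f x := lt_of_le_of_ne hM (fun e => hx e.symm)
    simp only [List.filter_cons, hx, decide_false, Bool.false_eq_true, if_false, if_pos hlt]
    rcases foldl_min_mem (xs.map f) (f x) with he | he
    · exact absurd he.symm hx
    · obtain ⟨y, hy, hfy⟩ := List.mem_map.mp he
      have hne : xs.filter (fun z => decide (f z = (xs.map f).foldl min (f x))) ≠ [] :=
        List.ne_nil_of_mem (List.mem_filter.mpr ⟨hy, by simp [hfy]⟩)
      exact headD_congr _ hne _ _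

-- ===== VERDICT (by name: the statement is the Claim_ definition above) =====
theorem MinimizeHammingDistance_spec : Claim_equal_MinimizeHammingDistance := by
  intro v c _hdom hpre
  obtain ⟨hne, hlen, _hwin⟩ := hpre
  unfold Spec_MinimizeHammingDistance
  cases c with
  | nil => exact absurd rfl hne
  | cons x xs =>
    have hmapA : (List.range (x :: xs).length).map (fun j =>
        (List.range v.length).foldl (fun odl i =>
          if ((x :: xs).getD j []).getD i 0 ≠ v.getD i 0 then odl + 1 else odl) (0 : Int))
        = (x :: xs).map (bDist v) := by
      rw [mapRange_getD (x :: xs) [] (fun cw => (List.range v.length).foldl (fun odl i => if cw.getD i 0 ≠ v.getD i 0 then odl + 1 else odl) (0 : Int))]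
      apply List.map_congr_left
      intro cw hcw
      exact dist_eq v cw 0 (hlen cw hcw)
    simp only [MinimizeHammingDistance, MinimizeHammingDistance_alt]
    rw [hmapA]
    simp only [List.map_cons, PySem.List.min?_id_cons, Option.getD_some, List.foldl_cons]
    rw [a_select (bDist v) x xs, optfold, pairfold (bDist v)]
    simp only [Option.map_some, Option.getD_some]
    rw [headD_filter_eq (bDist v) x xs]
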